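-- pv_equiv track=rewrite | github.com/pulkit2374/Smartest | app.py | format_inr_crore
-- ===== SOURCE A (Python) =====
-- def format_inr_crore(value):
--     try:
--         value = int(value) // 10_00_000
--         s = str(value)[::-1]
--         parts = [s[0:3]]
--         s = s[3:]
--         while s:
--             parts.append(s[0:2])
--             s = s[2:]
--         return ','.join(parts)[::-1]
--     except:
--         return value
-- ===== SOURCE B (Python) =====
-- def format_inr_crore(value):
--     s = str(int(value) // 10_00_000)
--     head, last3 = s[:-3], s[-3:]
--     groups = []
--     i = len(head)
--     while i > 0:
--         groups.append(head[max(0, i - 2):i])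
--         i -= 2
--     groups.reverse()
--     groups.append(last3)
--     return ','.join(groups)
-- ===== Notes on version B (the rewrite author's own statement) =====
-- stated objective: simpler
-- what changed: B drops A's reverse-group-reverse dance: it splits the unreversed quotient string into its final triple of characters and leading pairs taken right-to-left by index, then joins once, with no string reversals.
import Mathlib
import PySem

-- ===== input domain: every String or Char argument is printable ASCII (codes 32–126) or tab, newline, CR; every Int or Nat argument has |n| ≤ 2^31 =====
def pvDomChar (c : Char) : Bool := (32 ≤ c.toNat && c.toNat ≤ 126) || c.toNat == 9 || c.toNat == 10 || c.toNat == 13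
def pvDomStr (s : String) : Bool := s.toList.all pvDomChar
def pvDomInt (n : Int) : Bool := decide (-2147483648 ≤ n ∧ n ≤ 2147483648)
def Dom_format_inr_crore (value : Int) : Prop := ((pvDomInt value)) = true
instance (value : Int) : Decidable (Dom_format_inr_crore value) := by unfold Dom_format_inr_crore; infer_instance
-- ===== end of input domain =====

-- B groups the UNREVERSED digit string (split off the final triple, then pairs right-to-left)
-- instead of A's reverse–group–reverse; same return value, objective: simpler decomposition.
-- A's try/except is unreachable for an int argument (int(value) and // are total), so neither port carries it.

-- ===== PORT A =====
-- A's while loop: while s: parts.append(s[0:2]); s = s[2:]  — pairs of the reversed string, front to back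
def pvChunks2A (s : List Char) : List (List Char) :=
  if s.isEmpty then [] else s.take 2 :: pvChunks2A (s.drop 2)
termination_by s.length
decreasing_by
  cases s with
  | nil => simp_all
  | cons a t => simp

-- literal port of A; s[::-1] is exact list reversal, the slices have nonnegative bounds
-- (s[0:3] = take 3, s[3:] = drop 3), and ','.join = intercalate [','] on char lists.
def format_inr_crore (value : Int) : String :=
  let v := PySem.Int.floordiv value 1000000
  let s := (PySem.Int.toStr v).toList.reverse
  let parts := s.take 3 :: pvChunks2A (s.drop 3)
  String.ofList (List.intercalate [','] parts).reverse

-- ===== PORT B =====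
-- B's while loop: while i > 0: groups.append(head[max(0,i-2):i]); i -= 2
-- head[max(0,i-2):i] = (head.take i).drop (i-2)  (Nat subtraction clamps at 0 like max(0,·))
def pvGroupsB (head : List Char) (i : Nat) : List (List Char) :=
  if i = 0 then [] else ((head.take i).drop (i - 2)) :: pvGroupsB head (i - 2)
termination_by i
decreasing_by omega

-- literal port of B; s[:-3] = take (len-3), s[-3:] = drop (len-3) (Nat subtraction clamps
-- at 0 exactly as Python clamps the negative index here); groups.reverse(); groups.append(last3).
def format_inr_crore_alt (value : Int) : String :=
  let s := (PySem.Int.toStr (PySem.Int.floordiv value 1000000)).toList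
  let head := s.take (s.length - 3)
  let last3 := s.drop (s.length - 3)
  let groups := (pvGroupsB head head.length).reverse ++ [last3]
  String.ofList (List.intercalate [','] groups)

-- ===== PRECONDITION & SPEC =====
def Spec_format_inr_crore (value : Int) (out : String) : Prop := out = format_inr_crore_alt value
instance (value : Int) (out : String) : Decidable (Spec_format_inr_crore value out) := by unfold Spec_format_inr_crore; infer_instance

-- ===== CLAIM (what is proved, stated in full; the proofs are below) =====
def Claim_equal_format_inr_crore : Prop := ∀ (value : Int), Dom_format_inr_crore value → Spec_format_inr_crore value (format_inr_crore value)

-- ===== LEMMAS AND PROOFS =====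

theorem intercalate_cons_cons (s x y : List Char) (t : List (List Char)) :
    List.intercalate s (x :: y :: t) = x ++ s ++ List.intercalate s (y :: t) := by
  simp [List.intercalate, List.intersperse]

theorem intercalate_concat (s x : List Char) (l : List (List Char)) (hl : l ≠ []) :
    List.intercalate s (l ++ [x]) = List.intercalate s l ++ s ++ x := by
  induction l with
  | nil => exact absurd rfl hl
  | cons y t ih =>
    cases t with
    | nil => simp [List.intercalate]
    | cons z t' =>
      calc List.intercalate s ((y :: z :: t') ++ [x])
          = List.intercalate s (y :: z :: (t' ++ [x])) := by simp
        _ = y ++ s ++ List.intercalate s (z :: (t' ++ [x])) := intercalate_cons_cons s y z (t' ++ [x])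
        _ = y ++ s ++ List.intercalate s ((z :: t') ++ [x]) := by simp
        _ = y ++ s ++ (List.intercalate s (z :: t') ++ s ++ x) := by rw [ih (by simp)]
        _ = List.intercalate s (y :: z :: t') ++ s ++ x := by
              rw [intercalate_cons_cons s y z t']; simp

-- reversing a comma-joined list of reversed pieces = joining the pieces in reverse order
theorem reverse_intercalate_map_reverse (L : List (List Char)) :
    (List.intercalate [','] (L.map List.reverse)).reverse
      = List.intercalate [','] L.reverse := by
  induction L with
  | nil => simp [List.intercalate]
  | cons x t ih =>
    cases t with
    | nil => simp [List.intercalate]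
    | cons y t' =>
      rw [List.map_cons, List.map_cons,
        intercalate_cons_cons [','] x.reverse y.reverse (t'.map List.reverse),
        ← List.map_cons, List.reverse_cons,
        intercalate_concat _ _ _ (by simp), ← ih]
      simp

theorem pvGroupsB_zero (h : List Char) : pvGroupsB h 0 = [] := by
  rw [pvGroupsB]; simp

theorem pvGroupsB_pos (h : List Char) (i : Nat) (hi : i ≠ 0) :
    pvGroupsB h i = ((h.take i).drop (i - 2)) :: pvGroupsB h (i - 2) := by
  rw [pvGroupsB]; simp [hi]

-- pvGroupsB only looks at the first i elements of head
theorem pvGroupsB_take (i : Nat) (h : List Char) :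
    pvGroupsB (h.take i) i = pvGroupsB h i := by
  induction i using Nat.strong_induction_on generalizing h with
  | _ i ih =>
    by_cases hi : i = 0
    · rw [hi, pvGroupsB_zero, pvGroupsB_zero]
    · rw [pvGroupsB_pos _ _ hi, pvGroupsB_pos _ _ hi]
      congr 1
      · rw [List.take_take, min_self]
      · have e1 := ih (i - 2) (by omega) (h.take i)
        rw [List.take_take, show min (i - 2) i = i - 2 by omega] at e1
        rw [← e1, ih (i - 2) (by omega) h]

-- A's pair-chunking of the reversed list = B's right-to-left pair groups, each reversed
theorem chunks_eq_groups (n : Nat) (head : List Char) (hn : head.length = n) :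
    pvChunks2A head.reverse = (pvGroupsB head head.length).map List.reverse := by
  induction n using Nat.strong_induction_on generalizing head with
  | _ n ih =>
    by_cases h0 : head = []
    · subst h0; simp [pvChunks2A, pvGroupsB_zero]
    · have hlen : 0 < head.length := List.length_pos_of_ne_nil h0
      set a := head.take (head.length - 2) with ha
      set b := head.drop (head.length - 2) with hb
      have hab : head = a ++ b := (List.take_append_drop _ _).symm
      have hblen : b.length = head.length - (head.length - 2) := by
        rw [hb, List.length_drop]
      have hrev : head.reverse = b.reverse ++ a.reverse := by
        rw [hab]; simp
      have htk : head.reverse.take 2 = b.reverse := by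
        rcases Nat.lt_or_ge head.length 2 with hl | hl
        · have ha0 : a = [] := by
            rw [ha, show head.length - 2 = 0 by omega, List.take_zero]
          rw [hrev, ha0, List.reverse_nil, List.append_nil]
          exact List.take_of_length_le (by rw [List.length_reverse, hblen]; omega)
        · have hb2 : b.reverse.length = 2 := by
            rw [List.length_reverse, hblen]; omega
          rw [hrev, ← hb2, List.take_left]
      have hdr : head.reverse.drop 2 = a.reverse := by
        rcases Nat.lt_or_ge head.length 2 with hl | hl
        · have ha0 : a = [] := by
            rw [ha, show head.length - 2 = 0 by omega, List.take_zero]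
          rw [hrev, ha0, List.reverse_nil, List.append_nil]
          rw [List.drop_eq_nil_of_le (by rw [List.length_reverse, hblen]; omega)]
        · have hb2 : b.reverse.length = 2 := by
            rw [List.length_reverse, hblen]; omega
          rw [hrev, ← hb2, List.drop_left]
      have hne : head.reverse.isEmpty = false := by
        simp [h0]
      rw [pvChunks2A]
      simp only [hne, Bool.false_eq_true, if_false, htk, hdr]
      rw [pvGroupsB_pos _ _ (by omega), List.take_length]
      have hgb : pvGroupsB head (head.length - 2) = pvGroupsB a a.length := by
        have hal : a.length = head.length - 2 := by
          rw [ha, List.length_take]; omega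
        rw [← pvGroupsB_take (head.length - 2) head, ← ha, hal]
      rw [hgb, List.map_cons, ← hb]
      congr 1
      exact ih a.length (by rw [ha, List.length_take]; omega) a rfl

-- ===== VERDICT (by name: the statement is the Claim_ definition above) =====
theorem format_inr_crore_spec : Claim_equal_format_inr_crore := by
  intro value _
  unfold Spec_format_inr_crore format_inr_crore format_inr_crore_alt
  simp only
  set s := (PySem.Int.toStr (PySem.Int.floordiv value 1000000)).toList with hs
  rw [List.take_reverse, List.drop_reverse,
    chunks_eq_groups (s.take (s.length - 3)).length _ rfl]
  rw [show (s.drop (s.length - 3)).reverse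
        :: (pvGroupsB (s.take (s.length - 3)) (s.take (s.length - 3)).length).map List.reverse
      = ((s.drop (s.length - 3)) :: pvGroupsB (s.take (s.length - 3)) (s.take (s.length - 3)).length).map List.reverse
      from rfl]
  rw [reverse_intercalate_map_reverse, List.reverse_cons]
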